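-- pv_equiv track=rewrite | github.com/zackbrooks84/rc-xi-harness | harness/protocols/null.py | external_null_texts
-- ===== SOURCE A (Python) =====
-- from typing import List
--
-- def external_null_texts(texts: List[str], external_texts: List[str]) -> List[str]:
--     """Return an external transcript resized to match the length of ``texts``.
--
--     The external transcript is used as-is as the null condition — no drift
--     injection is applied. This lets callers supply a real contrasting
--     conversation (e.g. topic-unrelated, shallow, or semantically distant)
--     rather than synthetic drift insertions.
--
--     Parameters
--     ----------
--     texts:
--         The identity transcript. Its length determines the target length of
--         the returned sequence.
--     external_texts:
--         The external null transcript. If longer than ``texts`` it is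
--         truncated; if shorter it is cycled (repeated from the beginning)
--         until the required length is reached.
--
--     Returns
--     -------
--     List[str]
--         A list of exactly ``len(texts)`` strings drawn from
--         ``external_texts``.
--
--     Raises
--     ------
--     ValueError
--         If ``external_texts`` is empty.
--     """
--     target = len(texts)
--     if not external_texts:
--         raise ValueError("external_texts must not be empty.")
--     if target == 0:
--         return []
--     if len(external_texts) >= target:
--         return list(external_texts[:target])
--     # Cycle to fill
--     out: List[str] = []
--     while len(out) < target:
--         out.extend(external_texts)
--     return out[:target]
-- ===== SOURCE B (Python) =====
-- def external_null_texts(texts, external_texts):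
--     """Resize external transcript to len(texts) by modular indexing."""
--     if not external_texts:
--         raise ValueError("external_texts must not be empty.")
--     n = len(external_texts)
--     return [external_texts[i % n] for i in range(len(texts))]
-- ===== Notes on version B (the rewrite author's own statement) =====
-- stated objective: idiomatic
-- what changed: Replaced A's three-way branching (empty target, slice-truncate, while-loop extending whole copies then truncating) with a single modular-index comprehension [external_texts[i % n] for i in range(len(texts))] after the same empty-input guard.
import Mathlib
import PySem

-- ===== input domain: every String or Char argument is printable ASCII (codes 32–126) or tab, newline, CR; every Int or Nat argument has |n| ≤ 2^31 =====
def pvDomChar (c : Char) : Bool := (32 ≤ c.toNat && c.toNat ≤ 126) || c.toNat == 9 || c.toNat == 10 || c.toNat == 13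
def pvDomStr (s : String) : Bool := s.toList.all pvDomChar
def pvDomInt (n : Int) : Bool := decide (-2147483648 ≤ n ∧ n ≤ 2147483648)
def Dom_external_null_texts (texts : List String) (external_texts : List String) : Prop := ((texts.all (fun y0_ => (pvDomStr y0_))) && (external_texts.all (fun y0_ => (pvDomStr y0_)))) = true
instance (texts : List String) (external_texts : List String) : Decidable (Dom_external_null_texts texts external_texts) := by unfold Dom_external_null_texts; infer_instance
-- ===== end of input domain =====

-- B replaces A's truncate/cycle branching with one modular-index pass (idiomatic; same cost).
-- Both Pythons raise ValueError on empty external_texts; Pre_ excludes exactly that.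

-- ===== PORT A =====
-- the `while len(out) < target: out.extend(external_texts)` loop; hne justifies termination
def extLoopA (ext : List String) (hne : ext ≠ []) (target : Nat) (out : List String) : List String :=
  if out.length < target then extLoopA ext hne target (out ++ ext) else out
termination_by target - out.length
decreasing_by
  have : 0 < ext.length := List.length_pos_iff.mpr hne
  simp only [List.length_append]; omega

def external_null_texts (texts : List String) (external_texts : List String) : List String :=
  let target := texts.length
  if h : external_texts = [] then []   -- Python raises ValueError here; excluded by Pre_
  else if target = 0 then []
  else if external_texts.length ≥ target then external_texts.take target  -- ext[:target], target ≥ 0: exact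
  else (extLoopA external_texts h target []).take target

-- ===== PORT B =====
def external_null_texts_alt (texts : List String) (external_texts : List String) : List String :=
  if external_texts = [] then []   -- Python raises ValueError here; excluded by Pre_
  else (List.range texts.length).map (fun i => external_texts.getD (i % external_texts.length) "")

-- ===== PRECONDITION & SPEC =====
-- A raises ValueError exactly when external_texts is empty (B raises there too).
def Pre_external_null_texts (texts : List String) (external_texts : List String) : Prop :=
  external_texts ≠ []
instance (texts : List String) (external_texts : List String) : Decidable (Pre_external_null_texts texts external_texts) := by unfold Pre_external_null_texts; infer_instance

def pvWitness_external_null_texts : List String × List String := (["a", "b", "c"], ["x", "y"])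

def Spec_external_null_texts (texts : List String) (external_texts : List String) (out : List String) : Prop := out = external_null_texts_alt texts external_texts
instance (texts : List String) (external_texts : List String) (out : List String) : Decidable (Spec_external_null_texts texts external_texts out) := by unfold Spec_external_null_texts; infer_instance

-- ===== CLAIM (what is proved, stated in full; the proofs are below) =====
def Claim_equal_external_null_texts : Prop := ∀ (texts : List String) (external_texts : List String), Dom_external_null_texts texts external_texts → Pre_external_null_texts texts external_texts → Spec_external_null_texts texts external_texts (external_null_texts texts external_texts)

-- ===== LEMMAS AND PROOFS =====

-- the loop keeps `out` a prefix of the infinite cyclic repetition of `ext`, and stops with length ≥ target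
theorem extLoopA_spec (ext : List String) (hne : ext ≠ []) (target : Nat) (out : List String)
    (hinv : ∀ j, j < out.length → out[j]? = ext[j % ext.length]?)
    (hdvd : ext.length ∣ out.length) :
    target ≤ (extLoopA ext hne target out).length ∧
      ∀ j, j < target → (extLoopA ext hne target out)[j]? = ext[j % ext.length]? := by
  have hn : 0 < ext.length := List.length_pos_iff.mpr hne
  induction out using extLoopA.induct ext hne target with
  | case1 out hlt ih =>
    rw [extLoopA, if_pos hlt]
    apply ih
    · intro j hj
      simp only [List.length_append] at hj
      by_cases hj' : j < out.length
      · rw [List.getElem?_append_left hj']; exact hinv j hj'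
      · rw [not_lt] at hj'
        rw [List.getElem?_append_right hj']
        have h1 : j - out.length < ext.length := by omega
        obtain ⟨k, hk⟩ := hdvd
        have hmod : j % ext.length = j - out.length := by
          conv_lhs => rw [(by omega : j = ext.length * k + (j - out.length))]
          rw [Nat.mul_add_mod]
          exact Nat.mod_eq_of_lt h1
        rw [hmod]
    · simp only [List.length_append]
      exact Dvd.dvd.add hdvd (dvd_refl _)
  | case2 out hlt =>
    rw [extLoopA, if_neg hlt]
    rw [not_lt] at hlt
    exact ⟨hlt, fun j hj => hinv j (lt_of_lt_of_le hj hlt)⟩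

-- ===== VERDICT (by name: the statement is the Claim_ definition above) =====
theorem external_null_texts_spec : Claim_equal_external_null_texts := by
  intro texts ext _ hpre
  unfold Spec_external_null_texts external_null_texts external_null_texts_alt
  have hne : ext ≠ [] := hpre
  have hn : 0 < ext.length := List.length_pos_iff.mpr hne
  rw [dif_neg hne, if_neg hne]
  set target := texts.length with htarget
  by_cases h0 : target = 0
  · rw [if_pos h0, h0]; simp
  · rw [if_neg h0]
    -- the common element-wise description of both sides
    have hmap : ∀ (l : List String), l.length = target →
        (∀ j, j < target → l[j]? = ext[j % ext.length]?) →
        l = (List.range target).map (fun i => ext.getD (i % ext.length) "") := by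
      intro l hlen hchar
      apply List.ext_getElem?
      intro i
      by_cases hi : i < target
      · have him : i % ext.length < ext.length := Nat.mod_lt _ hn
        rw [List.getElem?_map, List.getElem?_range hi, hchar i hi]
        simp [List.getD_eq_getElem?_getD, List.getElem?_eq_getElem him]
      · rw [List.getElem?_eq_none (by omega : l.length ≤ i),
            List.getElem?_eq_none (by simpa using (by omega : target ≤ i))]
    by_cases hge : ext.length ≥ target
    · rw [if_pos hge]
      apply hmap
      · simp; omega
      · intro j hj
        simp only [List.getElem?_take, if_pos hj]
        rw [Nat.mod_eq_of_lt (by omega)]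
    · rw [if_neg hge]
      have hspec := extLoopA_spec ext hne target [] (by simp) (by simp)
      apply hmap
      · simp; omega
      · intro j hj
        simp only [List.getElem?_take, if_pos hj]
        exact hspec.2 j hj
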